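-- pv_equiv track=rewrite | github.com/enjector/microgpt-c | demos/character-level/mastermind/generate_corpus.py | knuth_play
-- ===== SOURCE A (Python) =====
-- from itertools import product
--
-- PEGS = 4
--
-- COLOURS = ['A', 'B', 'C', 'D', 'E', 'F']
--
-- def all_codes():
--     """Generate all possible 4-peg codes."""
--     return [''.join(p) for p in product(COLOURS, repeat=PEGS)]
--
-- def score(guess, secret):
--     """Return (black_pegs, white_pegs)."""
--     black = sum(g == s for g, s in zip(guess, secret))
--     # Count colour matches
--     guess_counts = {c: 0 for c in COLOURS}
--     secret_counts = {c: 0 for c in COLOURS}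
--     for g, s in zip(guess, secret):
--         if g != s:
--             guess_counts[g] += 1
--             secret_counts[s] += 1
--     white = sum(min(guess_counts[c], secret_counts[c]) for c in COLOURS)
--     return (black, white)
--
-- def minimax_first_guess():
--     """Knuth's first guess is always AABB."""
--     return "AABB"
--
-- def filter_remaining(remaining, guess, feedback):
--     """Filter remaining codes consistent with the feedback."""
--     return [code for code in remaining if score(guess, code) == feedback]
--
-- def knuth_play(secret, max_guesses=10):
--     """Play a game using a simplified Knuth algorithm.
--     Returns list of (guess, black, white) tuples."""
--     remaining = all_codes()
--     history = []
--
--     guess = minimax_first_guess()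
--
--     for turn in range(max_guesses):
--         b, w = score(guess, secret)
--         history.append((guess, b, w))
--
--         if b == PEGS:
--             break  # solved
--
--         remaining = filter_remaining(remaining, guess, (b, w))
--         if not remaining:
--             break
--
--         # Next guess: pick first remaining code (simple strategy)
--         # For more variety, pick based on entropy
--         guess = remaining[0]
--
--     return history
-- ===== SOURCE B (Python) =====
-- from itertools import product
--
-- PEGS = 4
-- COLOURS = ['A', 'B', 'C', 'D', 'E', 'F']
--
-- def _score(guess, secret):
--     # black = positional matches; white = total colour overlap minus black
--     pairs = list(zip(guess, secret))
--     black = sum(g == s for g, s in pairs)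
--     gz = [g for g, _ in pairs]
--     sz = [s for _, s in pairs]
--     total = sum(min(gz.count(c), sz.count(c)) for c in set(gz))
--     return (black, total - black)
--
-- def knuth_play(secret, max_guesses=10):
--     def play(guess, remaining, turns_left):
--         if turns_left == 0:
--             return []
--         b, w = _score(guess, secret)
--         step = [(guess, b, w)]
--         if b == PEGS:
--             return step
--         narrowed = [c for c in remaining if _score(guess, c) == (b, w)]
--         if not narrowed:
--             return step
--         return step + play(narrowed[0], narrowed, turns_left - 1)
--     return play("AABB", [''.join(p) for p in product(COLOURS, repeat=PEGS)],
--                 max(max_guesses, 0))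
-- ===== Notes on version B (the rewrite author's own statement) =====
-- stated objective: alternative
-- what changed: The scorer is re-decomposed (black = positional matches, white = total per-colour overlap of full counts over the distinct guess colours, minus black, instead of A's mismatch-only count dictionaries summed over all six colours) and the iterative game loop with an appended history becomes a recursion that filters inline and builds the history front-to-back.
import Mathlib
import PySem

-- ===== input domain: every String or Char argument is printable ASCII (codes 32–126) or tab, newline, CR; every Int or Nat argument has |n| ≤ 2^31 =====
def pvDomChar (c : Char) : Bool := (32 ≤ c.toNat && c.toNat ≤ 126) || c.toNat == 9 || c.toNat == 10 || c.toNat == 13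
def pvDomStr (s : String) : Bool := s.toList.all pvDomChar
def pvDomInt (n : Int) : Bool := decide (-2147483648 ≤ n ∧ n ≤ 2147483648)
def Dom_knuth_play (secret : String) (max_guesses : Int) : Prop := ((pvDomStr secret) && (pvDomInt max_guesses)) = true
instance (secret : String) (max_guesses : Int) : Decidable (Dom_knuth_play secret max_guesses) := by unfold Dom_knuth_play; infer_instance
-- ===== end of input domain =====

-- B re-decomposes the scorer: black = positional matches, white = total colour overlap
-- (min of full per-colour counts, summed over the distinct guess colours) minus black,
-- and replaces A's iterative game loop by a recursion building the history front-to-back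
-- (objective: alternative decomposition, same cost).

-- ===== PORT A =====
def COLOURS : List Char := ['A', 'B', 'C', 'D', 'E', 'F']

-- all_codes(): [''.join(p) for p in product(COLOURS, repeat=4)]
def allCodes : List String :=
  COLOURS.flatMap (fun a => COLOURS.flatMap (fun b => COLOURS.flatMap (fun c =>
    COLOURS.map (fun d => String.ofList [a, b, c, d]))))

-- score(guess, secret); the dict increments guess_counts[g] += 1 / secret_counts[s] += 1 are
-- ported with getD: exact whenever the key is present, i.e. on Pre_ (Python raises KeyError otherwise)
def scoreA (guess secret : List Char) : Int × Int :=
  let pairs := guess.zip secret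
  let black : Int := (pairs.map (fun p => if p.1 = p.2 then (1 : Int) else 0)).sum
  let gc0 : PySem.Dict Char Int := COLOURS.foldl (fun d c => d.insert c 0) PySem.Dict.empty
  let sc0 : PySem.Dict Char Int := COLOURS.foldl (fun d c => d.insert c 0) PySem.Dict.empty
  let st := pairs.foldl (fun (st : PySem.Dict Char Int × PySem.Dict Char Int) p =>
      if p.1 ≠ p.2 then
        (st.1.insert p.1 (st.1.getD p.1 0 + 1), st.2.insert p.2 (st.2.getD p.2 0 + 1))
      else st) (gc0, sc0)
  let white : Int := (COLOURS.map (fun c => min (st.1.getD c 0) (st.2.getD c 0))).sum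
  (black, white)

-- the 'for turn in range(max_guesses)' loop with its two breaks, as fuel recursion
def loopA (secretL : List Char) : Nat → List String → String → List (String × Int × Int) → List (String × Int × Int)
  | 0, _, _, hist => hist
  | fuel + 1, remaining, guess, hist =>
    let bw := scoreA guess.toList secretL
    let hist' := hist ++ [(guess, bw.1, bw.2)]
    if bw.1 = 4 then hist'
    else
      -- filter_remaining(remaining, guess, (b, w))
      match remaining.filter (fun code => decide (scoreA guess.toList code.toList = bw)) with
      | [] => hist'
      | r0 :: rest => loopA secretL fuel (r0 :: rest) r0 hist'

def knuth_play (secret : String) (max_guesses : Int) : List (String × Int × Int) :=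
  loopA secret.toList max_guesses.toNat allCodes "AABB" []

-- ===== PORT B =====
def scoreB (guess secret : List Char) : Int × Int :=
  let pairs := guess.zip secret
  let black : Int := (pairs.map (fun p => if p.1 = p.2 then (1 : Int) else 0)).sum
  let gz := pairs.map (·.1)
  let sz := pairs.map (·.2)
  let total : Int := ((PySem.Set.ofList gz).map (fun c => min (gz.count c : Int) (sz.count c : Int))).sum
  (black, total - black)

-- recursive play(guess, remaining, turns_left), history built front-to-back
def playB (secretL : List Char) : String → List String → Nat → List (String × Int × Int)
  | _, _, 0 => []
  | guess, remaining, tl + 1 =>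
    let bw := scoreB guess.toList secretL
    let step := [(guess, bw.1, bw.2)]
    if bw.1 = 4 then step
    else
      match remaining.filter (fun c => decide (scoreB guess.toList c.toList = bw)) with
      | [] => step
      | n0 :: rest => step ++ playB secretL n0 (n0 :: rest) tl

def knuth_play_alt (secret : String) (max_guesses : Int) : List (String × Int × Int) :=
  playB secret.toList "AABB" allCodes (max max_guesses 0).toNat

-- ===== PRECONDITION & SPEC =====
-- Pre_ excludes exactly the inputs where A raises KeyError: a non-colour character among the
-- first min(4, len(secret)) characters always mismatches a colour guess, so score crashes on
-- the first turn (unless max_guesses ≤ 0, where the loop body never runs).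
def Pre_knuth_play (secret : String) (max_guesses : Int) : Prop :=
  max_guesses ≤ 0 ∨ (secret.toList.take 4).all (fun c => decide (c ∈ COLOURS)) = true
instance (secret : String) (max_guesses : Int) : Decidable (Pre_knuth_play secret max_guesses) := by
  unfold Pre_knuth_play; infer_instance

def pvWitness_knuth_play : String × Int := ("CDEA", 10)

def Spec_knuth_play (secret : String) (max_guesses : Int) (out : List (String × Int × Int)) : Prop := out = knuth_play_alt secret max_guesses
instance (secret : String) (max_guesses : Int) (out : List (String × Int × Int)) : Decidable (Spec_knuth_play secret max_guesses out) := by unfold Spec_knuth_play; infer_instance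

-- ===== CLAIM (what is proved, stated in full; the proofs are below) =====
def Claim_equal_knuth_play : Prop := ∀ (secret : String) (max_guesses : Int), Dom_knuth_play secret max_guesses → Pre_knuth_play secret max_guesses → Spec_knuth_play secret max_guesses (knuth_play secret max_guesses)

-- ===== LEMMAS AND PROOFS =====

def okCode (code : String) : Prop :=
  code.toList.length = 4 ∧ ∀ c ∈ code.toList, c ∈ COLOURS

lemma sum_counts (S : List Char) (xs : List Char) (hS : S.Nodup) (hsub : ∀ x ∈ xs, x ∈ S) :
    (S.map (fun c => (xs.count c : Int))).sum = xs.length := by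
  induction S generalizing xs with
  | nil =>
    have : xs = [] := List.eq_nil_iff_forall_not_mem.mpr (fun x hx => by simpa using hsub x hx)
    simp [this]
  | cons c S ih =>
    have hcnodup := (List.nodup_cons.mp hS)
    set ys := xs.filter (fun x => !(x == c)) with hys
    have hmem : ∀ c' ∈ S, (xs.count c' : Int) = ys.count c' := by
      intro c' hc'
      have hne : c' ≠ c := fun hh => hcnodup.1 (hh ▸ hc')
      rw [hys, List.count_filter (by simpa using hne)]
    have hsub' : ∀ x ∈ ys, x ∈ S := by
      intro x hx
      rcases List.mem_filter.mp hx with ⟨hx1, hx2⟩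
      rcases List.mem_cons.mp (hsub x hx1) with h | h
      · simp [h] at hx2
      · exact h
    have hlen : xs.count c + ys.length = xs.length := by
      have hsplit := List.countP_eq_countP_filter_add xs (fun _ => true) (fun x => x == c)
      simp only [List.countP_true, ← List.countP_eq_length_filter] at hsplit
      rw [hys, ← List.countP_eq_length_filter, List.count_eq_countP]
      omega
    calc (List.map (fun c => (xs.count c : Int)) (c :: S)).sum
        = (xs.count c : Int) + (S.map (fun c' => (xs.count c' : Int))).sum := by simp
      _ = (xs.count c : Int) + (S.map (fun c' => (ys.count c' : Int))).sum := by
          rw [List.map_congr_left hmem]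
      _ = (xs.count c : Int) + ys.length := by rw [ih ys hcnodup.2 hsub']
      _ = xs.length := by exact_mod_cast hlen

lemma sum_eq_over (S T : List Char) (f : Char → Int) (hS : S.Nodup) (hT : T.Nodup)
    (h1 : ∀ c ∈ S, c ∉ T → f c = 0) (h2 : ∀ c ∈ T, c ∉ S → f c = 0) :
    (S.map f).sum = (T.map f).sum := by
  rw [← List.sum_toFinset f hS, ← List.sum_toFinset f hT]
  exact Finset.sum_congr_of_eq_on_inter
    (fun a ha hb => h1 a (List.mem_toFinset.mp ha) (fun hh => hb (List.mem_toFinset.mpr hh)))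
    (fun a ha hb => h2 a (List.mem_toFinset.mp ha) (fun hh => hb (List.mem_toFinset.mpr hh)))
    (fun a _ _ => rfl)

lemma count_map_fst (l : List (Char × Char)) (c : Char) :
    (l.map (·.1)).count c = l.countP (fun p => p.1 == c) := by
  simp [List.count_eq_countP, List.countP_map]; rfl

lemma count_map_snd (l : List (Char × Char)) (c : Char) :
    (l.map (·.2)).count c = l.countP (fun p => p.2 == c) := by
  simp [List.count_eq_countP, List.countP_map]; rfl

lemma score_eq (g s : List Char) (h : ∀ p ∈ g.zip s, p.1 ∈ COLOURS ∧ p.2 ∈ COLOURS) :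
    scoreA g s = scoreB g s := by
  unfold scoreA scoreB
  dsimp only
  set pairs := g.zip s with hpairs
  set mis := pairs.filter (fun p => decide (p.1 ≠ p.2)) with hmis
  set eqs := pairs.filter (fun p => !decide (p.1 ≠ p.2)) with heqs
  -- A's paired dict fold splits into two single-dict folds
  have hfun : (fun (st : PySem.Dict Char Int × PySem.Dict Char Int) (p : Char × Char) =>
        if p.1 ≠ p.2 then
          (st.1.insert p.1 (st.1.getD p.1 0 + 1), st.2.insert p.2 (st.2.getD p.2 0 + 1))
        else st)
      = (fun st p => ((if p.1 ≠ p.2 then st.1.insert p.1 (st.1.getD p.1 0 + 1) else st.1),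
                      (if p.1 ≠ p.2 then st.2.insert p.2 (st.2.getD p.2 0 + 1) else st.2))) := by
    funext st p; split_ifs <;> simp
  rw [hfun]
  have hst : List.foldl
      (fun (st : PySem.Dict Char Int × PySem.Dict Char Int) (p : Char × Char) =>
        (if p.1 ≠ p.2 then st.1.insert p.1 (st.1.getD p.1 0 + 1) else st.1,
          if p.1 ≠ p.2 then st.2.insert p.2 (st.2.getD p.2 0 + 1) else st.2))
      (List.foldl (fun d c => d.insert c 0) PySem.Dict.empty COLOURS,
        List.foldl (fun d c => d.insert c 0) PySem.Dict.empty COLOURS) pairs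
      = (List.foldl (fun d (p : Char × Char) => if p.1 ≠ p.2 then d.insert p.1 (d.getD p.1 0 + 1) else d)
          (List.foldl (fun d c => d.insert c 0) PySem.Dict.empty COLOURS) pairs,
        List.foldl (fun d (p : Char × Char) => if p.1 ≠ p.2 then d.insert p.2 (d.getD p.2 0 + 1) else d)
          (List.foldl (fun d c => d.insert c 0) PySem.Dict.empty COLOURS) pairs) :=
    PySem.List.foldl_prod_mk
      (fun (d : PySem.Dict Char Int) (p : Char × Char) => if p.1 ≠ p.2 then d.insert p.1 (d.getD p.1 0 + 1) else d)
      (fun (d : PySem.Dict Char Int) (p : Char × Char) => if p.1 ≠ p.2 then d.insert p.2 (d.getD p.2 0 + 1) else d) pairs _ _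
  rw [hst]
  have hflt1 : List.foldl (fun (d : PySem.Dict Char Int) (p : Char × Char) =>
        if p.1 ≠ p.2 then d.insert p.1 (d.getD p.1 0 + 1) else d)
      (List.foldl (fun d c => d.insert c 0) PySem.Dict.empty COLOURS) pairs
      = List.foldl (fun (d : PySem.Dict Char Int) (p : Char × Char) => d.insert p.1 (d.getD p.1 0 + 1))
        (List.foldl (fun d c => d.insert c 0) PySem.Dict.empty COLOURS)
        (pairs.filter (fun p => decide (p.1 ≠ p.2))) :=
    PySem.List.foldl_ite_eq_foldl_filter (fun p : Char × Char => p.1 ≠ p.2)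
      (fun (d : PySem.Dict Char Int) (p : Char × Char) => d.insert p.1 (d.getD p.1 0 + 1)) pairs _
  have hflt2 : List.foldl (fun (d : PySem.Dict Char Int) (p : Char × Char) =>
        if p.1 ≠ p.2 then d.insert p.2 (d.getD p.2 0 + 1) else d)
      (List.foldl (fun d c => d.insert c 0) PySem.Dict.empty COLOURS) pairs
      = List.foldl (fun (d : PySem.Dict Char Int) (p : Char × Char) => d.insert p.2 (d.getD p.2 0 + 1))
        (List.foldl (fun d c => d.insert c 0) PySem.Dict.empty COLOURS)
        (pairs.filter (fun p => decide (p.1 ≠ p.2))) :=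
    PySem.List.foldl_ite_eq_foldl_filter (fun p : Char × Char => p.1 ≠ p.2)
      (fun (d : PySem.Dict Char Int) (p : Char × Char) => d.insert p.2 (d.getD p.2 0 + 1)) pairs _
  rw [hflt1, hflt2]
  rw [Prod.mk.injEq]
  refine ⟨rfl, ?_⟩
  -- name the pieces
  have hzero : ∀ c ∈ COLOURS,
      (COLOURS.foldl (fun (d : PySem.Dict Char Int) c => d.insert c 0) PySem.Dict.empty).getD c 0 = 0 := by
    intro c hc; fin_cases hc <;> rfl
  have hg : ∀ c ∈ COLOURS,
      ((mis.foldl (fun d (p : Char × Char) => d.insert p.1 (d.getD p.1 0 + 1))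
        (COLOURS.foldl (fun d c => d.insert c 0) PySem.Dict.empty)).getD c 0)
      = ((mis.map (·.1)).count c : Int) := by
    intro c hc
    rw [← List.foldl_map (f := fun p : Char × Char => p.1)
        (g := fun (d : PySem.Dict Char Int) x => d.insert x (d.getD x 0 + 1)),
      PySem.Dict.getD_foldl_insert_add_one, hzero c hc, zero_add]
  have hs2 : ∀ c ∈ COLOURS,
      ((mis.foldl (fun d (p : Char × Char) => d.insert p.2 (d.getD p.2 0 + 1))
        (COLOURS.foldl (fun d c => d.insert c 0) PySem.Dict.empty)).getD c 0)
      = ((mis.map (·.2)).count c : Int) := by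
    intro c hc
    rw [← List.foldl_map (f := fun p : Char × Char => p.2)
        (g := fun (d : PySem.Dict Char Int) x => d.insert x (d.getD x 0 + 1)),
      PySem.Dict.getD_foldl_insert_add_one, hzero c hc, zero_add]
  rw [List.map_congr_left (fun c hc => by dsimp only; rw [hg c hc, hs2 c hc] :
    ∀ c ∈ COLOURS, (fun c => min
      ((mis.foldl (fun d (p : Char × Char) => d.insert p.1 (d.getD p.1 0 + 1))
        (COLOURS.foldl (fun d c => d.insert c 0) PySem.Dict.empty)).getD c 0)
      ((mis.foldl (fun d (p : Char × Char) => d.insert p.2 (d.getD p.2 0 + 1))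
        (COLOURS.foldl (fun d c => d.insert c 0) PySem.Dict.empty)).getD c 0)) c
      = (fun c => min ((mis.map (·.1)).count c : Int) ((mis.map (·.2)).count c : Int)) c)]
  -- black is the number of matched positions
  have hblack : (pairs.map (fun p => if p.1 = p.2 then (1 : Int) else 0)).sum = (eqs.length : Int) := by
    have hb1 : ∀ p ∈ pairs, (if p.1 = p.2 then (1 : Int) else 0)
        = (if (fun q : Char × Char => !decide (q.1 ≠ q.2)) p = true then (1 : Int) else 0) := by
      intro p _; by_cases hp : p.1 = p.2 <;> simp [hp]
    rw [List.map_congr_left hb1, PySem.List.sum_map_ite_one_zero, List.countP_eq_length_filter]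
  -- full counts split into mismatch + match counts
  have hcnt1 : ∀ c : Char, ((pairs.map (·.1)).count c : Int)
      = ((mis.map (·.1)).count c : Int) + ((eqs.map (·.1)).count c : Int) := by
    intro c
    rw [count_map_fst, count_map_fst, count_map_fst, hmis, heqs,
      List.countP_eq_countP_filter_add pairs (fun p => p.1 == c) (fun p => decide (p.1 ≠ p.2))]
    push_cast; ring
  have hcnt2 : ∀ c : Char, ((pairs.map (·.2)).count c : Int)
      = ((mis.map (·.2)).count c : Int) + ((eqs.map (·.2)).count c : Int) := by
    intro c
    rw [count_map_snd, count_map_snd, count_map_snd, hmis, heqs,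
      List.countP_eq_countP_filter_add pairs (fun p => p.2 == c) (fun p => decide (p.1 ≠ p.2))]
    push_cast; ring
  have heqcnt : ∀ c : Char, (eqs.map (·.1)).count c = (eqs.map (·.2)).count c := by
    intro c
    rw [count_map_fst, count_map_snd]
    refine List.countP_congr (fun p hp => ?_)
    have : p.1 = p.2 := by
      have := (List.mem_filter.mp hp).2; simpa using this
    simp [this]
  have hmin : ∀ c ∈ PySem.Set.ofList (pairs.map (·.1)),
      (fun c => min ((pairs.map (·.1)).count c : Int) ((pairs.map (·.2)).count c : Int)) c
      = (fun c => min ((mis.map (·.1)).count c : Int) ((mis.map (·.2)).count c : Int)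
          + ((eqs.map (·.1)).count c : Int)) c := by
    intro c _
    dsimp only
    rw [hcnt1 c, hcnt2 c, ← heqcnt c, Int.min_add_right]
  rw [List.map_congr_left hmin, PySem.List.sum_map_add_int]
  -- the matched chars all lie in the distinct guess colours, so their counts sum to black
  have hsum_e : ((PySem.Set.ofList (pairs.map (·.1))).map
      (fun c => ((eqs.map (·.1)).count c : Int))).sum = ((eqs.map (·.1)).length : Int) := by
    refine sum_counts _ _ (PySem.Set.nodup_ofList _) (fun x hx => ?_)
    rcases List.mem_map.mp hx with ⟨p, hp, rfl⟩
    exact (PySem.Set.mem_ofList _ _).mpr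
      (List.mem_map.mpr ⟨p, List.mem_filter.mp hp |>.1, rfl⟩)
  rw [hsum_e]
  -- mismatch-count min sums agree over COLOURS and over the distinct guess colours
  have hsum_min : ((PySem.Set.ofList (pairs.map (·.1))).map
        (fun c => min ((mis.map (·.1)).count c : Int) ((mis.map (·.2)).count c : Int))).sum
      = (COLOURS.map
        (fun c => min ((mis.map (·.1)).count c : Int) ((mis.map (·.2)).count c : Int))).sum := by
    refine sum_eq_over _ _ _ (PySem.Set.nodup_ofList _) (by decide) ?_ ?_
    · intro c hc hnc
      rcases List.mem_map.mp ((PySem.Set.mem_ofList _ _).mp hc) with ⟨p, hp, rfl⟩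
      exact absurd (h p hp).1 hnc
    · intro c _ hnc
      have h0 : (mis.map (·.1)).count c = 0 := by
        by_contra hne
        have hcmem : c ∈ mis.map (·.1) := List.count_pos_iff.mp (Nat.pos_of_ne_zero hne)
        rcases List.mem_map.mp hcmem with ⟨p, hp, rfl⟩
        exact hnc ((PySem.Set.mem_ofList _ _).mpr
          (List.mem_map.mpr ⟨p, List.mem_filter.mp hp |>.1, rfl⟩))
      rw [h0]
      simp
  rw [hsum_min, hblack, List.length_map]
  ring

lemma zip_ok (g : List Char) (s : List Char) (hlen : g.length = 4)
    (hg : ∀ c ∈ g, c ∈ COLOURS) (hs : ∀ c ∈ s.take 4, c ∈ COLOURS) :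
    ∀ p ∈ g.zip s, p.1 ∈ COLOURS ∧ p.2 ∈ COLOURS := by
  intro p hp
  rw [List.zip_eq_zip_take_min] at hp
  have h12 := List.of_mem_zip hp
  constructor
  · exact hg p.1 (List.take_subset _ _ h12.1)
  · refine hs p.2 (List.take_subset_take_left s ?_ h12.2)
    rw [hlen]; exact Nat.min_le_left _ _

lemma allCodes_ok : ∀ code ∈ allCodes, okCode code := by
  intro code hcode
  simp only [allCodes, List.mem_flatMap, List.mem_map] at hcode
  obtain ⟨a, ha, b, hb, c, hc, d, hd, rfl⟩ := hcode
  refine ⟨?_, ?_⟩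
  · simp [String.toList_ofList]
  · intro x hx
    simp only [String.toList_ofList, List.mem_cons, List.not_mem_nil, or_false] at hx
    rcases hx with rfl | rfl | rfl | rfl <;> assumption

lemma loop_eq (secretL : List Char) (hs : ∀ c ∈ secretL.take 4, c ∈ COLOURS) :
    ∀ (fuel : Nat) (rem : List String) (guess : String) (hist : List (String × Int × Int)),
      okCode guess → (∀ r ∈ rem, okCode r) →
      loopA secretL fuel rem guess hist = hist ++ playB secretL guess rem fuel := by
  intro fuel
  induction fuel with
  | zero => intro rem guess hist _ _; simp [loopA, playB]
  | succ n ih =>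
    intro rem guess hist hok hrem
    simp only [loopA, playB]
    rw [score_eq guess.toList secretL (zip_ok _ _ hok.1 hok.2 hs)]
    have hfilt : rem.filter (fun code => decide (scoreA guess.toList code.toList = scoreB guess.toList secretL))
        = rem.filter (fun code => decide (scoreB guess.toList code.toList = scoreB guess.toList secretL)) :=
      List.filter_congr (fun code hm => by
        rw [score_eq guess.toList code.toList
          (zip_ok _ _ hok.1 hok.2 (fun c hc => (hrem code hm).2 c (List.take_subset _ _ hc)))])
    rw [hfilt]
    by_cases hb : (scoreB guess.toList secretL).1 = 4
    · simp [hb]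
    · simp only [if_neg hb]
      cases hflt : rem.filter (fun code => decide (scoreB guess.toList code.toList = scoreB guess.toList secretL)) with
      | nil => simp
      | cons r0 rest =>
        have hr0 : okCode r0 := hrem r0 (List.mem_of_mem_filter (hflt ▸ List.mem_cons_self))
        have hrem' : ∀ r ∈ r0 :: rest, okCode r := fun r hr =>
          hrem r (List.mem_of_mem_filter (hflt ▸ hr))
        dsimp only
        rw [ih _ _ _ hr0 hrem']
        simp

-- ===== VERDICT (by name: the statement is the Claim_ definition above) =====
theorem knuth_play_spec : Claim_equal_knuth_play := by
  intro secret max_guesses _ hpre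
  unfold Spec_knuth_play knuth_play knuth_play_alt
  have hfuel : (max max_guesses 0).toNat = max_guesses.toNat := by omega
  rw [hfuel]
  rcases hpre with hm | hsec
  · have h0 : max_guesses.toNat = 0 := by omega
    rw [h0]; simp [loopA, playB]
  · have hsec' : ∀ c ∈ secret.toList.take 4, c ∈ COLOURS := by simpa using hsec
    have hok : okCode "AABB" := by
      refine ⟨rfl, ?_⟩
      intro c hc
      have hl : "AABB".toList = ['A', 'A', 'B', 'B'] := rfl
      rw [hl] at hc
      simp only [List.mem_cons, List.not_mem_nil, or_false] at hc
      rcases hc with rfl | rfl | rfl | rfl <;> decide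
    rw [loop_eq secret.toList hsec' max_guesses.toNat allCodes "AABB" [] hok allCodes_ok]
    simp
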